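-- pv_equiv track=rewrite | github.com/AnubhavKumarGupta/Python_DSA_GFG_Course | Contest/3.Sorting, Hashing/XOR Pair.py | pairExists
-- ===== SOURCE A (Python) =====
-- def pairExists(arr, n, c):
--     # Set to store elements encountered
--     s = set()
--
--     flag = False
--
--     for i in range(n):
--         # Check if the complement of current element exists in the set
--         if c ^ arr[i] in s:
--             flag = True
--             break
--
--         # Insert current element into the set
--         s.add(arr[i])
--
--     # Output
--     if flag:
--         return "Yes"
--     else:
--         return "No"
-- ===== SOURCE B (Python) =====
-- def pairExists(arr, n, c):
--     # Brute-force pair scan: check every index pair (i, j), i < j < n, directly.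
--     for i in range(n):
--         for j in range(i + 1, n):
--             if (arr[i] ^ arr[j]) == c:
--                 return "Yes"
--     return "No"
-- ===== Notes on version B (the rewrite author's own statement) =====
-- stated objective: alternative
-- what changed: Replaced the hash-set single pass (checking each element's complement against previously seen elements) with a direct nested double loop over all index pairs i < j that maintains no auxiliary structure.
-- outside the precondition, e.g. on pairExists([1, 5, 4], 5, 1): A returns 'Yes', B raises IndexError
import Mathlib
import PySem

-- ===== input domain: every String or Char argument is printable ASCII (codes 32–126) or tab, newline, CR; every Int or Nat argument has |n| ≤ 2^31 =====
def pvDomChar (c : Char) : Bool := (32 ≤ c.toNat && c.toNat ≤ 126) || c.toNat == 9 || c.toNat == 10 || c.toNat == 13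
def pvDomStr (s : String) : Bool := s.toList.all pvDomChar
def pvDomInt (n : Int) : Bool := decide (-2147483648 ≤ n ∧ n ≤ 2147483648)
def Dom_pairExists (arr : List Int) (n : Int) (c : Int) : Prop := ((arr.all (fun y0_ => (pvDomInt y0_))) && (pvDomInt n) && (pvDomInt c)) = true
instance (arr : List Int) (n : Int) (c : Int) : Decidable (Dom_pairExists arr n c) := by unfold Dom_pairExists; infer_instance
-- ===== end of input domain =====

-- B replaces A's hash-set single pass by a direct nested double loop over index pairs
-- (no auxiliary structure); same cost class not claimed — an alternative decomposition.

-- ===== PORT A =====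
-- Loop 'for i in range(n)': break on hit is modelled by the early 'true' return.
-- arr[i] is in range under Pre_, so pyGetD arr i 0 is exact there.
def pairExistsLoopA (arr : List Int) (c : Int) : List Int → PySem.Set Int → Bool
  | [], _ => false
  | i :: rest, s =>
    if PySem.Set.contains s (PySem.Int.bxor c (PySem.List.pyGetD arr i 0)) then true
    else pairExistsLoopA arr c rest (PySem.Set.add s (PySem.List.pyGetD arr i 0))

def pairExists (arr : List Int) (n : Int) (c : Int) : String :=
  if pairExistsLoopA arr c (PySem.List.pyRange 0 n 1) PySem.Set.empty then "Yes" else "No"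

-- ===== PORT B =====
def pairExistsInner (arr : List Int) (c : Int) (x : Int) : List Int → Bool
  | [] => false
  | j :: rest =>
    if PySem.Int.bxor x (PySem.List.pyGetD arr j 0) = c then true
    else pairExistsInner arr c x rest

def pairExistsOuter (arr : List Int) (n : Int) (c : Int) : List Int → Bool
  | [] => false
  | i :: rest =>
    if pairExistsInner arr c (PySem.List.pyGetD arr i 0) (PySem.List.pyRange (i + 1) n 1) then true
    else pairExistsOuter arr n c rest

def pairExists_alt (arr : List Int) (n : Int) (c : Int) : String :=
  if pairExistsOuter arr n c (PySem.List.pyRange 0 n 1) then "Yes" else "No"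

-- ===== PRECONDITION & SPEC =====
-- Pre_ excludes n greater than the list length: there arr[i] raises IndexError in Python
-- (in A once the scan reaches an out-of-range index, in B possibly earlier because it
-- visits pairs in a different order), so the two programs are not comparable.
def Pre_pairExists (arr : List Int) (n : Int) (c : Int) : Prop := n ≤ (arr.length : Int)
instance (arr : List Int) (n : Int) (c : Int) : Decidable (Pre_pairExists arr n c) := by unfold Pre_pairExists; infer_instance

def pvWitness_pairExists : List Int × Int × Int := ([1, 5, 4], 3, 1)

def Spec_pairExists (arr : List Int) (n : Int) (c : Int) (out : String) : Prop := out = pairExists_alt arr n c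
instance (arr : List Int) (n : Int) (c : Int) (out : String) : Decidable (Spec_pairExists arr n c out) := by unfold Spec_pairExists; infer_instance

-- ===== CLAIM (what is proved, stated in full; the proofs are below) =====
def Claim_equal_pairExists : Prop := ∀ (arr : List Int) (n : Int) (c : Int), Dom_pairExists arr n c → Pre_pairExists arr n c → Spec_pairExists arr n c (pairExists arr n c)

-- ===== LEMMAS AND PROOFS =====

theorem bxor_cancel (a b : Int) : PySem.Int.bxor (PySem.Int.bxor a b) b = a := by
  unfold PySem.Int.bxor
  by_cases ha : 0 ≤ a <;> by_cases hb : 0 ≤ b <;> simp [ha, hb]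
  · intro h
    exfalso
    have := Int.natCast_nonneg (a.toNat ^^^ ((-b).toNat - 1))
    omega
  · rw [if_neg (by have := Int.natCast_nonneg ((-a).toNat - 1 ^^^ b.toNat); omega)]
    omega
  · omega

theorem inner_iff (arr : List Int) (c x n : Int) (m : Nat) :
    ∀ t : Int, t + m = n →
      (pairExistsInner arr c x (PySem.List.pyRange t n 1) = true ↔
        ∃ j, t ≤ j ∧ j < n ∧ PySem.Int.bxor x (PySem.List.pyGetD arr j 0) = c) := by
  induction m with
  | zero =>
    intro t ht
    rw [PySem.List.pyRange_one_eq_nil (by omega)]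
    simp [pairExistsInner]
    omega
  | succ m ih =>
    intro t ht
    rw [PySem.List.pyRange_one_cons (by omega)]
    simp only [pairExistsInner]
    by_cases h : PySem.Int.bxor x (PySem.List.pyGetD arr t 0) = c
    · simp [h]
      exact ⟨t, le_refl t, by omega, h⟩
    · rw [if_neg h, ih (t + 1) (by omega)]
      constructor
      · rintro ⟨j, h1, h2, h3⟩
        exact ⟨j, by omega, h2, h3⟩
      · rintro ⟨j, h1, h2, h3⟩
        refine ⟨j, ?_, h2, h3⟩
        rcases eq_or_lt_of_le h1 with rfl | h'
        · exact absurd h3 h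
        · omega

theorem outer_iff (arr : List Int) (c n : Int) (m : Nat) :
    ∀ k : Int, k + m = n →
      (pairExistsOuter arr n c (PySem.List.pyRange k n 1) = true ↔
        ∃ i j, k ≤ i ∧ i < j ∧ j < n ∧ PySem.Int.bxor (PySem.List.pyGetD arr i 0) (PySem.List.pyGetD arr j 0) = c) := by
  induction m with
  | zero =>
    intro k hk
    rw [PySem.List.pyRange_one_eq_nil (by omega)]
    simp [pairExistsOuter]
    omega
  | succ m ih =>
    intro k hk
    rw [PySem.List.pyRange_one_cons (by omega)]
    simp only [pairExistsOuter]
    by_cases h : pairExistsInner arr c (PySem.List.pyGetD arr k 0) (PySem.List.pyRange (k + 1) n 1) = true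
    · rw [if_pos h]
      rw [inner_iff arr c _ n m (k + 1) (by omega)] at h
      obtain ⟨j, h1, h2, h3⟩ := h
      constructor
      · intro _
        exact ⟨k, j, le_refl k, by omega, h2, h3⟩
      · intro _
        rfl
    · rw [if_neg h, ih (k + 1) (by omega)]
      rw [inner_iff arr c _ n m (k + 1) (by omega)] at h
      push Not at h
      constructor
      · rintro ⟨i, j, h1, h2, h3, h4⟩
        exact ⟨i, j, by omega, h2, h3, h4⟩
      · rintro ⟨i, j, h1, h2, h3, h4⟩
        refine ⟨i, j, ?_, h2, h3, h4⟩
        rcases eq_or_lt_of_le h1 with rfl | h'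
        · exact absurd h4 (h j (by omega) h3)
        · omega

theorem loopA_iff (arr : List Int) (c n : Int) (m : Nat) :
    ∀ (k : Int) (s : PySem.Set Int), k + m = n →
      (pairExistsLoopA arr c (PySem.List.pyRange k n 1) s = true ↔
        ∃ i, k ≤ i ∧ i < n ∧
          (PySem.Int.bxor c (PySem.List.pyGetD arr i 0) ∈ s ∨
            ∃ j, k ≤ j ∧ j < i ∧ PySem.List.pyGetD arr j 0 = PySem.Int.bxor c (PySem.List.pyGetD arr i 0))) := by
  induction m with
  | zero =>
    intro k s hk
    rw [PySem.List.pyRange_one_eq_nil (by omega)]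
    simp [pairExistsLoopA]
    omega
  | succ m ih =>
    intro k s hk
    rw [PySem.List.pyRange_one_cons (by omega)]
    simp only [pairExistsLoopA]
    by_cases h : PySem.Int.bxor c (PySem.List.pyGetD arr k 0) ∈ s
    · rw [if_pos (by rw [PySem.Set.contains_iff]; exact h)]
      simp
      exact ⟨k, le_refl k, by omega, Or.inl h⟩
    · rw [if_neg (by rw [PySem.Set.contains_iff]; exact h), ih (k + 1) _ (by omega)]
      constructor
      · rintro ⟨i, h1, h2, h3 | ⟨j, h4, h5, h6⟩⟩
        · rw [PySem.Set.mem_add] at h3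
          rcases h3 with h3 | h3
          · exact ⟨i, by omega, h2, Or.inl h3⟩
          · exact ⟨i, by omega, h2, Or.inr ⟨k, le_refl k, by omega, h3.symm⟩⟩
        · exact ⟨i, by omega, h2, Or.inr ⟨j, by omega, h5, h6⟩⟩
      · rintro ⟨i, h1, h2, h3 | ⟨j, h4, h5, h6⟩⟩
        · refine ⟨i, ?_, h2, Or.inl ?_⟩
          · rcases eq_or_lt_of_le h1 with rfl | h'
            · exact absurd h3 h
            · omega
          · rw [PySem.Set.mem_add]
            exact Or.inl h3
          -- the case i = k with membership is impossible; handled above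
        · rcases eq_or_lt_of_le h4 with rfl | h'
          · exact ⟨i, by omega, h2, Or.inl (by rw [PySem.Set.mem_add]; exact Or.inr h6.symm)⟩
          · exact ⟨i, by omega, h2, Or.inr ⟨j, by omega, h5, h6⟩⟩

theorem ports_agree (arr : List Int) (n c : Int) :
    pairExists arr n c = pairExists_alt arr n c := by
  unfold pairExists pairExists_alt
  rcases (by omega : n ≤ 0 ∨ 0 < n) with hn | hn
  · rw [PySem.List.pyRange_one_eq_nil (by omega)]
    simp [pairExistsLoopA, pairExistsOuter]
  · have h0 : (0 : Int) + n.toNat = n := by omega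
    rw [show (pairExistsLoopA arr c (PySem.List.pyRange 0 n 1) PySem.Set.empty =
          pairExistsOuter arr n c (PySem.List.pyRange 0 n 1)) from ?_]
    rw [Bool.eq_iff_iff, loopA_iff arr c n n.toNat 0 PySem.Set.empty h0,
        outer_iff arr c n n.toNat 0 h0]
    constructor
    · rintro ⟨i, h1, h2, h3 | ⟨j, h4, h5, h6⟩⟩
      · exact absurd h3 (List.not_mem_nil)
      · refine ⟨j, i, h4, h5, h2, ?_⟩
        rw [h6]
        exact bxor_cancel c (PySem.List.pyGetD arr i 0)
    · rintro ⟨i, j, h1, h2, h3, h4⟩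
      refine ⟨j, by omega, h3, Or.inr ⟨i, h1, h2, ?_⟩⟩
      rw [← h4]
      exact (bxor_cancel _ _).symm

-- ===== VERDICT (by name: the statement is the Claim_ definition above) =====
theorem pairExists_spec : Claim_equal_pairExists := by
  intro arr n c _ _
  unfold Spec_pairExists
  exact ports_agree arr n c
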